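-- pv_equiv track=rewrite | github.com/ApolloAuto/apollo | modules/planning/planning_base/tools/log_util.py | search_next
-- ===== SOURCE A (Python) =====
-- def get_string_between(string, st, ed=''):
--     """get string between keywords"""
--     if string.find(st) < 0:
--         return ''
--     sub_string = string[string.find(st) + len(st):]
--     if len(ed) == 0 or sub_string.find(ed) < 0:
--         return sub_string.strip()
--     return sub_string[:sub_string.find(ed)]
--
-- def get_time(line):
--     """get time from line"""
--     return get_string_between(line, ' ', ' ')
--
-- def search_next(lines, line_search_num):
--     """search forward, return frame start and end line number"""
--     start_line_num = -1
--     seq_id = '-1'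
--     seq_time = "NULL"
--     for i in range(line_search_num, len(lines)):
--         if 'Planning start frame sequence id' in lines[i]:
--             seq_time = get_time(lines[i])
--             seq_id = get_string_between(lines[i], 'sequence id = [', ']')
--             start_line_num = i
--             break
--     if start_line_num < 0:
--         return -1, -1, seq_id, seq_time
--
--     for i in range(start_line_num, len(lines)):
--         if 'Planning end frame sequence id = [' + seq_id in lines[i]:
--             return start_line_num, i, seq_id, seq_time
--     return start_line_num, -1, seq_id, seq_time
-- ===== SOURCE B (Python) =====
-- def get_string_between(string, st, ed=''):
--     """get string between keywords"""
--     if string.find(st) < 0: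
--         return ''
--     sub_string = string[string.find(st) + len(st):]
--     if len(ed) == 0 or sub_string.find(ed) < 0:
--         return sub_string.strip()
--     return sub_string[:sub_string.find(ed)]
--
-- def get_time(line):
--     """get time from line"""
--     return get_string_between(line, ' ', ' ')
--
-- def search_next(lines, line_search_num):
--     """single pass: find the frame start, then keep scanning the same pass for its end"""
--     started = False
--     start_line_num = -1
--     seq_id = '-1'
--     seq_time = 'NULL'
--     for i in range(line_search_num, len(lines)):
--         line = lines[i]
--         if not started:
--             if 'Planning start frame sequence id' in line:
--                 seq_time = get_time(line)
--                 seq_id = get_string_between(line, 'sequence id = [', ']')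
--                 start_line_num = i
--                 started = True
--                 if 'Planning end frame sequence id = [' + seq_id in line:
--                     return start_line_num, i, seq_id, seq_time
--         elif 'Planning end frame sequence id = [' + seq_id in line:
--             return start_line_num, i, seq_id, seq_time
--     if started:
--         return start_line_num, -1, seq_id, seq_time
--     return -1, -1, seq_id, seq_time
-- ===== Notes on version B (the rewrite author's own statement) =====
-- stated objective: alternative
-- what changed: A's two sequential scans (find the start line, then rescan from it for the end line) are fused into one pass carrying a 'started' flag, seq_id/seq_time and the start index, testing the start line itself for the end marker in the same iteration.
-- intended difference: On negative line_search_num whose wrapped scan finds the start marker at a negative index (observably, per D_), A returns (-1,-1,seq_id,seq_time) because it mistakes the found negative index for its own not-found sentinel while still leaking the extracted seq_id/seq_time; B returns the start/end indices it actually found, the intended value, consistent with its behaviour at non-negative indices. — e.g. on search_next(["x Planning start frame sequence id = [7] y", "zzz"], -2): A returns (-1, -1, "7", "Planning"), B returns (-2, -1, "7", "Planning")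
import Mathlib
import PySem

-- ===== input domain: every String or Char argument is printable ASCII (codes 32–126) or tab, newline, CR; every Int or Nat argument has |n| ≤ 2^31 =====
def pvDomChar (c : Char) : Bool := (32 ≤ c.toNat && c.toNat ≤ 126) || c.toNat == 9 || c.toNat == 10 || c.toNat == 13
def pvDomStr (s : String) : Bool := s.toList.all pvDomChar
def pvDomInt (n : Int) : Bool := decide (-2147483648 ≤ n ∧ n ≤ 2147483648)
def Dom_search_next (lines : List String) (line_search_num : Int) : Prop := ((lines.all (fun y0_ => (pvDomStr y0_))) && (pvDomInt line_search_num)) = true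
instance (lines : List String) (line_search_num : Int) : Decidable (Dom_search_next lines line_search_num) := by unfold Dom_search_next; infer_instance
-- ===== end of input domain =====

-- B fuses A's two sequential scans into one pass carrying a 'started' flag (alternative decomposition, same cost);
-- D_ marks the negative-line_search_num inputs where A's wrapped scan hits the start marker at a negative index
-- and A's sentinel check discards the frame it found, observably: there A ≠ B and B's value is the intended one.


-- ===== PORT A =====
-- get_string_between, exact port (find / slice / strip via PySem)
def gsb (s st ed : String) : String :=
  if PySem.Str.find s st < 0 then ""
  else
    let sub := PySem.Str.slice s (some (PySem.Str.find s st + PySem.Str.len st)) none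
    if PySem.Str.len ed = 0 || PySem.Str.find sub ed < 0 then PySem.Str.strip sub
    else PySem.Str.slice sub none (some (PySem.Str.find sub ed))

def get_time (line : String) : String := gsb line " " " "

-- first loop of A: first i in the range whose line contains the start marker, with seq_id/seq_time
def searchStartA (lines : List String) : List Int → Int × String × String
  | [] => (-1, "-1", "NULL")
  | i :: rest =>
    let line := PySem.List.pyGetD lines i ""
    if PySem.Str.isIn "Planning start frame sequence id" line then
      (i, gsb line "sequence id = [" "]", get_time line)
    else searchStartA lines rest

-- second loop of A: first i in the range whose line contains the end marker, else -1
def searchEndA (lines : List String) (seq_id : String) : List Int → Int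
  | [] => -1
  | i :: rest =>
    if PySem.Str.isIn ("Planning end frame sequence id = [" ++ seq_id) (PySem.List.pyGetD lines i "") then i
    else searchEndA lines seq_id rest

def search_next (lines : List String) (line_search_num : Int) : Int × Int × String × String :=
  let r := searchStartA lines (PySem.List.pyRange line_search_num (lines.length : Int) 1)
  if r.1 < 0 then (-1, -1, r.2.1, r.2.2)
  else (r.1, searchEndA lines r.2.1 (PySem.List.pyRange r.1 (lines.length : Int) 1), r.2.1, r.2.2)

-- ===== PORT B =====
-- single pass with a 'started' flag (Source B); the start line itself is also tested for the end marker
def loopB (lines : List String) : List Int → Bool → Int → String → String → Int × Int × String × String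
  | [], started, s, id, t => if started then (s, -1, id, t) else (-1, -1, id, t)
  | i :: rest, started, s, id, t =>
    let line := PySem.List.pyGetD lines i ""
    if !started then
      if PySem.Str.isIn "Planning start frame sequence id" line then
        let t' := get_time line
        let id' := gsb line "sequence id = [" "]"
        if PySem.Str.isIn ("Planning end frame sequence id = [" ++ id') line then (i, i, id', t')
        else loopB lines rest true i id' t'
      else loopB lines rest false s id t
    else
      if PySem.Str.isIn ("Planning end frame sequence id = [" ++ id) line then (s, i, id, t)
      else loopB lines rest started s id t

def search_next_alt (lines : List String) (line_search_num : Int) : Int × Int × String × String :=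
  loopB lines (PySem.List.pyRange line_search_num (lines.length : Int) 1) false (-1) "-1" "NULL"

-- ===== PRECONDITION & SPEC =====
-- Pre_ excludes exactly the inputs where Python raises IndexError: line_search_num below -len(lines)
def Pre_search_next (lines : List String) (line_search_num : Int) : Prop :=
  -(lines.length : Int) ≤ line_search_num
instance (lines : List String) (line_search_num : Int) : Decidable (Pre_search_next lines line_search_num) := by unfold Pre_search_next; infer_instance
def pvWitness_search_next : List String × Int := (["a b Planning start frame sequence id = [3] c"], 0)

-- On negative line_search_num whose wrapped scan finds the start marker at a negative index, A returns
-- (-1,-1,seq_id,seq_time) because it mistakes the found negative index for its own not-found sentinel (yet leaks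
-- the extracted seq_id/seq_time), while B returns the start/end indices it actually found, the intended value;
-- D_ states the exact condition under which that slip is observable (first disjunct: a start line strictly before
-- the last line of the wrapped prefix; second: start on the last line with an end line appearing only later).
-- (gsb = A's own get_string_between helper, used here only to name the seq id written on the start line.)
def D_search_next (lines : List String) (line_search_num : Int) : Prop :=
  let L := (lines.length : Int)
  let last := lines.getD (lines.length - 1) ""
  let e := "Planning end frame sequence id = [" ++ gsb last "sequence id = [" "]"
  (∃ j ∈ List.range lines.length, line_search_num ≤ (j : Int) - L ∧ (j : Int) - L < -1 ∧
      PySem.Str.isIn "Planning start frame sequence id" (lines.getD j "")) ∨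
  (1 ≤ lines.length ∧ line_search_num ≤ -1 ∧ PySem.Str.isIn "Planning start frame sequence id" last ∧
    ¬ PySem.Str.isIn e last ∧ ∃ j ∈ List.range (lines.length - 1), PySem.Str.isIn e (lines.getD j ""))
instance (lines : List String) (line_search_num : Int) : Decidable (D_search_next lines line_search_num) := by unfold D_search_next; infer_instance

def Spec_search_next (lines : List String) (line_search_num : Int) (out : Int × Int × String × String) : Prop := ¬ D_search_next lines line_search_num → out = search_next_alt lines line_search_num
instance (lines : List String) (line_search_num : Int) (out : Int × Int × String × String) : Decidable (Spec_search_next lines line_search_num out) := by unfold Spec_search_next; infer_instance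

def pvDiffWitness_search_next : List String × Int := (["x Planning start frame sequence id = [7] y", "zzz"], -2)
def pvDiffWitnessOut_search_next : (Int × Int × String × String) × (Int × Int × String × String) :=
  ((-1, -1, "7", "Planning"), (-2, -1, "7", "Planning"))

-- ===== CLAIM (what is proved, stated in full; the proofs are below) =====
def Claim_unchanged_search_next : Prop := ∀ (lines : List String) (line_search_num : Int), Dom_search_next lines line_search_num → Pre_search_next lines line_search_num → Spec_search_next lines line_search_num (search_next lines line_search_num)
def Claim_changed_search_next : Prop := Dom_search_next (pvDiffWitness_search_next.1) (pvDiffWitness_search_next.2) ∧ Pre_search_next (pvDiffWitness_search_next.1) (pvDiffWitness_search_next.2) ∧ D_search_next (pvDiffWitness_search_next.1) (pvDiffWitness_search_next.2) ∧ search_next (pvDiffWitness_search_next.1) (pvDiffWitness_search_next.2) = pvDiffWitnessOut_search_next.1 ∧ search_next_alt (pvDiffWitness_search_next.1) (pvDiffWitness_search_next.2) = pvDiffWitnessOut_search_next.2 ∧ pvDiffWitnessOut_search_next.1 ≠ pvDiffWitnessOut_search_next.2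
def Claim_exact_search_next : Prop := ∀ (lines : List String) (line_search_num : Int), Dom_search_next lines line_search_num → Pre_search_next lines line_search_num → D_search_next lines line_search_num → search_next lines line_search_num ≠ search_next_alt lines line_search_num

-- ===== LEMMAS AND PROOFS =====

theorem pv_bnot {b : Bool} (h : ¬ b = true) : b = false := by
  cases b
  · rfl
  · exact absurd rfl h

-- a line that contains the start marker was really read, so its index is in range
theorem pv_marker_lb (lines : List String) (i : Int)
    (h : PySem.Str.isIn "Planning start frame sequence id" (PySem.List.pyGetD lines i "") = true) :
    -(lines.length : Int) ≤ i := by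
  by_contra h2
  have hnone : PySem.List.pyGetD lines i "" = "" := by
    apply PySem.List.pyGetD_of_none
    simp [PySem.List.pyGet?_eq_none_iff, PySem.Raise.InRange]
    omega
  rw [hnone] at h
  exact absurd h (by decide)

-- Python's negative index: lines[i] = lines[len+i]
theorem pv_wrap (lines : List String) (i : Int) (h1 : -(lines.length : Int) ≤ i) (h2 : i < 0) :
    PySem.List.pyGetD lines i "" = lines.getD (lines.length - (-i).toNat) "" := by
  obtain ⟨k, rfl⟩ : ∃ k : Nat, i = -(k : Int) := ⟨(-i).toNat, by omega⟩
  have hk0 : 0 < k := by omega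
  have hkl : k ≤ lines.length := by omega
  simp only [neg_neg, Int.toNat_natCast]
  rw [PySem.List.pyGetD_neg_natCast _ _ _ hk0 hkl]
  exact (List.getD_eq_getElem lines "" (by omega)).symm

theorem pv_wrap_nonneg (lines : List String) (i : Int) (h1 : 0 ≤ i) (h2 : i < (lines.length : Int)) :
    PySem.List.pyGetD lines i "" = lines.getD i.toNat "" := by
  rw [PySem.List.pyGetD_eq_getElem _ _ h1 h2]
  exact (List.getD_eq_getElem lines "" (by omega)).symm

-- A's first loop returns the FIRST index whose line holds the start marker, together with its seq_id/seq_time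
theorem pv_searchStartA_spec (lines : List String) :
    ∀ l : List Int, l.Pairwise (· < ·) →
      (∃ i ∈ l, PySem.Str.isIn "Planning start frame sequence id" (PySem.List.pyGetD lines i "") = true) →
      ∃ i0 ∈ l, PySem.Str.isIn "Planning start frame sequence id" (PySem.List.pyGetD lines i0 "") = true ∧
        (∀ x ∈ l, PySem.Str.isIn "Planning start frame sequence id" (PySem.List.pyGetD lines x "") = true → i0 ≤ x) ∧
        searchStartA lines l = (i0, gsb (PySem.List.pyGetD lines i0 "") "sequence id = [" "]", get_time (PySem.List.pyGetD lines i0 "")) := by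
  intro l
  induction l with
  | nil => rintro _ ⟨i, hi, _⟩; cases hi
  | cons a rest ih =>
    intro hp hex
    by_cases ha : PySem.Str.isIn "Planning start frame sequence id" (PySem.List.pyGetD lines a "") = true
    · refine ⟨a, List.mem_cons_self, ha, ?_, ?_⟩
      · intro x hx _
        rcases List.mem_cons.mp hx with rfl | hx'
        · exact le_refl x
        · exact le_of_lt ((List.pairwise_cons.mp hp).1 x hx')
      · simp only [searchStartA]
        rw [if_pos ha]
    · have hex' : ∃ i ∈ rest, PySem.Str.isIn "Planning start frame sequence id" (PySem.List.pyGetD lines i "") = true := by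
        rcases hex with ⟨i, hi, hmi⟩
        rcases List.mem_cons.mp hi with rfl | h
        · exact absurd hmi ha
        · exact ⟨i, h, hmi⟩
      obtain ⟨i0, hi0m, hm0, hmin, heq⟩ := ih (List.pairwise_cons.mp hp).2 hex'
      refine ⟨i0, List.mem_cons_of_mem _ hi0m, hm0, ?_, ?_⟩
      · intro x hx hmx
        rcases List.mem_cons.mp hx with rfl | hx'
        · exact absurd hmx ha
        · exact hmin x hx' hmx
      · simp only [searchStartA]
        rw [if_neg ha]
        exact heq

theorem pv_searchEndA_none (lines : List String) (id : String) :
    ∀ l : List Int,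
      (∀ x ∈ l, PySem.Str.isIn ("Planning end frame sequence id = [" ++ id) (PySem.List.pyGetD lines x "") = false) →
      searchEndA lines id l = -1 := by
  intro l
  induction l with
  | nil => intro _; rfl
  | cons a rest ih =>
    intro h
    have ha := h a List.mem_cons_self
    simp only [searchEndA]
    rw [if_neg (by simp only [Bool.not_eq_true]; exact ha)]
    exact ih (fun x hx => h x (List.mem_cons_of_mem _ hx))

theorem pv_searchEndA_mem (lines : List String) (id : String) :
    ∀ l : List Int,
      (∃ i ∈ l, PySem.Str.isIn ("Planning end frame sequence id = [" ++ id) (PySem.List.pyGetD lines i "") = true) →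
      searchEndA lines id l ∈ l := by
  intro l
  induction l with
  | nil => rintro ⟨i, hi, _⟩; cases hi
  | cons a rest ih =>
    intro hex
    by_cases ha : PySem.Str.isIn ("Planning end frame sequence id = [" ++ id) (PySem.List.pyGetD lines a "") = true
    · simp only [searchEndA]
      rw [if_pos ha]
      exact List.mem_cons_self
    · have hex' : ∃ i ∈ rest, PySem.Str.isIn ("Planning end frame sequence id = [" ++ id) (PySem.List.pyGetD lines i "") = true := by
        rcases hex with ⟨i, hi, hmi⟩
        rcases List.mem_cons.mp hi with rfl | h
        · exact absurd hmi ha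
        · exact ⟨i, h, hmi⟩
      simp only [searchEndA]
      rw [if_neg ha]
      exact List.mem_cons_of_mem _ (ih hex')

-- once started, B's remaining pass is exactly A's second loop
theorem loopB_started (lines : List String) (id : String) :
    ∀ (l : List Int) (s : Int) (t : String),
      loopB lines l true s id t = (s, searchEndA lines id l, id, t) := by
  intro l
  induction l with
  | nil => intro s t; rfl
  | cons i rest ih =>
    intro s t
    simp only [loopB, searchEndA, Bool.not_true, Bool.false_eq_true, if_false]
    rw [ih]
    split_ifs <;> rfl

-- if some line of the range holds the start marker, B's pass is "first start, then first end from there"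
theorem pv_loopB_found (lines : List String) :
    ∀ (k : Nat) (m : Int), ((lines.length : Int) - m).toNat = k →
      (∃ i ∈ PySem.List.pyRange m (lines.length : Int) 1,
          PySem.Str.isIn "Planning start frame sequence id" (PySem.List.pyGetD lines i "") = true) →
      loopB lines (PySem.List.pyRange m (lines.length : Int) 1) false (-1) "-1" "NULL" =
        (let r := searchStartA lines (PySem.List.pyRange m (lines.length : Int) 1)
         (r.1, searchEndA lines r.2.1 (PySem.List.pyRange r.1 (lines.length : Int) 1), r.2.1, r.2.2)) := by
  intro k
  induction k with
  | zero =>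
    intro m hk hex
    rw [PySem.List.pyRange_one_eq_nil (by omega)] at hex
    rcases hex with ⟨i, hi, _⟩
    cases hi
  | succ k ih =>
    intro m hk hex
    have hmb : m < (lines.length : Int) := by
      by_contra h
      rw [PySem.List.pyRange_one_eq_nil (by omega)] at hex
      rcases hex with ⟨i, hi, _⟩
      cases hi
    rw [PySem.List.pyRange_one_cons hmb]
    by_cases hst : PySem.Str.isIn "Planning start frame sequence id" (PySem.List.pyGetD lines m "") = true
    · simp only [loopB, searchStartA, hst, if_pos, Bool.not_false]
      rw [PySem.List.pyRange_one_cons hmb]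
      simp only [searchEndA]
      split_ifs with he
      · simp
      · simp [loopB_started]
    · have hst' : PySem.Str.isIn "Planning start frame sequence id" (PySem.List.pyGetD lines m "") = false := by
        simpa using hst
      have hex' : ∃ i ∈ PySem.List.pyRange (m + 1) (lines.length : Int) 1,
          PySem.Str.isIn "Planning start frame sequence id" (PySem.List.pyGetD lines i "") = true := by
        rcases hex with ⟨i, hi, hmi⟩
        rw [PySem.List.pyRange_one_cons hmb] at hi
        rcases List.mem_cons.mp hi with rfl | h
        · exact absurd hmi hst
        · exact ⟨i, h, hmi⟩
      simp only [loopB, searchStartA, hst', Bool.not_false, if_true, Bool.false_eq_true, if_false]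
      exact ih (m + 1) (by omega) hex'

-- main fused-loop invariant: as long as no start marker sits at a negative scanned index,
-- B's single pass from m computes A's two-loop result from m
theorem loopB_main (lines : List String) :
    ∀ (k : Nat) (m : Int), ((lines.length : Int) - m).toNat = k →
      (∀ i : Int, m ≤ i → i < 0 →
        PySem.Str.isIn "Planning start frame sequence id" (PySem.List.pyGetD lines i "") = false) →
      loopB lines (PySem.List.pyRange m (lines.length : Int) 1) false (-1) "-1" "NULL" =
        (let r := searchStartA lines (PySem.List.pyRange m (lines.length : Int) 1)
         if r.1 < 0 then (-1, -1, r.2.1, r.2.2)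
         else (r.1, searchEndA lines r.2.1 (PySem.List.pyRange r.1 (lines.length : Int) 1), r.2.1, r.2.2)) := by
  intro k
  induction k with
  | zero =>
    intro m hk _
    have hmb : (lines.length : Int) ≤ m := by omega
    rw [PySem.List.pyRange_one_eq_nil hmb]
    rfl
  | succ k ih =>
    intro m hk hneg
    have hmb : m < (lines.length : Int) := by omega
    rw [PySem.List.pyRange_one_cons hmb]
    by_cases hst : PySem.Str.isIn "Planning start frame sequence id" (PySem.List.pyGetD lines m "") = true
    · -- start marker found at m; m must be non-negative
      have hm0 : 0 ≤ m := by
        by_contra h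
        have hf := hneg m le_rfl (by omega)
        rw [hf] at hst
        simp at hst
      simp only [loopB, searchStartA, hst, if_pos, Bool.not_false]
      have hnotlt : ¬ (m < 0) := by omega
      simp only [hnotlt, if_false]
      rw [PySem.List.pyRange_one_cons hmb]
      simp only [searchEndA]
      split_ifs with he
      · simp
      · simp [loopB_started]
    · have hst' : PySem.Str.isIn "Planning start frame sequence id" (PySem.List.pyGetD lines m "") = false := by
        simpa using hst
      simp only [loopB, searchStartA, hst', Bool.not_false, if_true, Bool.false_eq_true, if_false]
      exact ih (m + 1) (by omega) (fun i hi hi0 => hneg i (by omega) hi0)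

-- a start marker strictly before index -1 of the wrapped scan makes A and B differ in the start component
theorem pv_tight_early (lines : List String) (n : Int)
    (hex : ∃ i, n ≤ i ∧ i < -1 ∧
      PySem.Str.isIn "Planning start frame sequence id" (PySem.List.pyGetD lines i "") = true) :
    search_next lines n ≠ search_next_alt lines n := by
  rcases hex with ⟨i, hni, hi1, hmi⟩
  have hlb := pv_marker_lb lines i hmi
  have hil : i < (lines.length : Int) := by omega
  have hexm : ∃ x ∈ PySem.List.pyRange n (lines.length : Int) 1,
      PySem.Str.isIn "Planning start frame sequence id" (PySem.List.pyGetD lines x "") = true :=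
    ⟨i, (PySem.List.mem_pyRange_one).mpr ⟨hni, hil⟩, hmi⟩
  obtain ⟨i0, hi0mem, _, hmin, heq⟩ :=
    pv_searchStartA_spec lines _ (PySem.List.pairwise_lt_pyRange_one _ _) hexm
  have hi0i : i0 ≤ i := hmin i ((PySem.List.mem_pyRange_one).mpr ⟨hni, hil⟩) hmi
  have hA : search_next lines n =
      (-1, -1, gsb (PySem.List.pyGetD lines i0 "") "sequence id = [" "]", get_time (PySem.List.pyGetD lines i0 "")) := by
    unfold search_next
    rw [heq]
    simp only []
    rw [if_pos (by omega : i0 < (0:Int))]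
  have hB : (search_next_alt lines n).1 = i0 := by
    unfold search_next_alt
    rw [pv_loopB_found lines ((lines.length : Int) - n).toNat n rfl hexm, heq]
  intro hcontra
  have : (search_next lines n).1 = i0 := by rw [hcontra, hB]
  rw [hA] at this
  simp at this
  omega

-- with no start marker strictly before -1, the first one the wrapped scan meets at a negative index is -1 itself
theorem pv_i0_eq_neg_one (lines : List String) (n : Int) (i0 : Int)
    (hi0m : PySem.Str.isIn "Planning start frame sequence id" (PySem.List.pyGetD lines i0 "") = true)
    (hni0 : n ≤ i0) (hi0neg : i0 < 0)
    (hc1 : ¬ ∃ j ∈ List.range lines.length,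
      n ≤ (j : Int) - (lines.length : Int) ∧ (j : Int) - (lines.length : Int) < -1 ∧
      PySem.Str.isIn "Planning start frame sequence id" (lines.getD j "") = true) :
    i0 = -1 := by
  by_contra hne
  have hlt : i0 < -1 := by omega
  have hlb := pv_marker_lb lines i0 hi0m
  apply hc1
  refine ⟨lines.length - (-i0).toNat, List.mem_range.mpr (by omega), by push_cast [Nat.cast_sub (by omega : (-i0).toNat ≤ lines.length)]; omega,
    by push_cast [Nat.cast_sub (by omega : (-i0).toNat ≤ lines.length)]; omega, ?_⟩
  rw [← pv_wrap lines i0 hlb (by omega)]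
  exact hi0m

-- ===== VERDICT (by name: the statement is the Claim_ definition above) =====
theorem search_next_spec : Claim_unchanged_search_next := by
  intro lines n _ _ hD
  by_cases hex : ∃ i ∈ PySem.List.pyRange n (lines.length : Int) 1, i < 0 ∧
      PySem.Str.isIn "Planning start frame sequence id" (PySem.List.pyGetD lines i "") = true
  · -- a start marker at a negative index: ¬D_ forces it to sit exactly at -1 with no later-only end line
    rcases hex with ⟨ineg, hinegmem, hineg0, hinegm⟩
    have hexm : ∃ x ∈ PySem.List.pyRange n (lines.length : Int) 1,
        PySem.Str.isIn "Planning start frame sequence id" (PySem.List.pyGetD lines x "") = true :=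
      ⟨ineg, hinegmem, hinegm⟩
    obtain ⟨i0, hi0mem, hi0m, hmin, heq⟩ :=
      pv_searchStartA_spec lines _ (PySem.List.pairwise_lt_pyRange_one _ _) hexm
    have hbounds := (PySem.List.mem_pyRange_one).mp hi0mem
    have hi0neg : i0 < 0 := lt_of_le_of_lt (hmin ineg hinegmem hinegm) hineg0
    have hi0 : i0 = -1 :=
      pv_i0_eq_neg_one lines n i0 hi0m hbounds.1 hi0neg (fun h => hD (Or.inl h))
    subst hi0
    have hlb := pv_marker_lb lines (-1) hi0m
    have hlen1 : 1 ≤ lines.length := by omega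
    have hlast : PySem.List.pyGetD lines (-1) "" = lines.getD (lines.length - 1) "" := by
      rw [pv_wrap lines (-1) hlb (by omega)]
      norm_num
    have he : searchEndA lines (gsb (PySem.List.pyGetD lines (-1) "") "sequence id = [" "]")
        (PySem.List.pyRange (-1) (lines.length : Int) 1) = -1 := by
      rw [PySem.List.pyRange_one_cons (by omega : (-1:Int) < (lines.length : Int))]
      simp only [searchEndA]
      by_cases hel : PySem.Str.isIn ("Planning end frame sequence id = [" ++ gsb (PySem.List.pyGetD lines (-1) "") "sequence id = [" "]") (PySem.List.pyGetD lines (-1) "") = true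
      · rw [if_pos hel]
      · rw [if_neg hel]
        have hno : ¬ ∃ j ∈ List.range (lines.length - 1),
            PySem.Str.isIn ("Planning end frame sequence id = [" ++ gsb (lines.getD (lines.length - 1) "") "sequence id = [" "]") (lines.getD j "") = true := by
          intro hx
          apply hD
          right
          refine ⟨hlen1, by omega, by rw [← hlast]; exact hi0m, ?_, hx⟩
          rw [← hlast]
          exact hel
        apply pv_searchEndA_none
        intro x hx
        have hxb := (PySem.List.mem_pyRange_one).mp hx
        rw [pv_wrap_nonneg lines x (by omega) (by omega), hlast]
        by_cases hxl : x.toNat = lines.length - 1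
        · rw [hxl, ← hlast]
          exact pv_bnot hel
        · rcases Bool.eq_false_or_eq_true (PySem.Str.isIn ("Planning end frame sequence id = [" ++ gsb (lines.getD (lines.length - 1) "") "sequence id = [" "]") (lines.getD x.toNat "")) with hb | hb
          · exact absurd ⟨x.toNat, List.mem_range.mpr (by omega), hb⟩ hno
          · exact hb
    unfold search_next search_next_alt
    rw [pv_loopB_found lines ((lines.length : Int) - n).toNat n rfl hexm, heq]
    simp only []
    rw [if_pos (by omega : (-1:Int) < 0), he]
  · -- no start marker at any negative index: the two passes coincide
    have hneg : ∀ i : Int, n ≤ i → i < 0 →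
        PySem.Str.isIn "Planning start frame sequence id" (PySem.List.pyGetD lines i "") = false := by
      intro i hi hi0
      by_contra h
      exact hex ⟨i, (PySem.List.mem_pyRange_one).mpr ⟨hi, by omega⟩, hi0, by simpa using h⟩
    have := loopB_main lines ((lines.length : Int) - n).toNat n rfl hneg
    unfold search_next search_next_alt
    rw [this]

theorem search_next_changed : Claim_changed_search_next := by
  unfold Claim_changed_search_next; decide

theorem search_next_tight : Claim_exact_search_next := by
  intro lines n _ _ hd
  rcases hd with ⟨j, hjr, hj1, hj2, hjm⟩ | ⟨hlen1, hn1, hml, hnel, j, hjr, hje⟩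
  · -- start marker strictly before -1
    apply pv_tight_early lines n
    refine ⟨(j : Int) - (lines.length : Int), hj1, hj2, ?_⟩
    have hjl := List.mem_range.mp hjr
    rw [pv_wrap lines _ (by omega) (by omega)]
    have : lines.length - (-((j : Int) - (lines.length : Int))).toNat = j := by omega
    rw [this]
    exact hjm
  · by_cases hc1 : ∃ j ∈ List.range lines.length,
        n ≤ (j : Int) - (lines.length : Int) ∧ (j : Int) - (lines.length : Int) < -1 ∧
        PySem.Str.isIn "Planning start frame sequence id" (lines.getD j "") = true
    · rcases hc1 with ⟨j', hjr', hj1', hj2', hjm'⟩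
      apply pv_tight_early lines n
      refine ⟨(j' : Int) - (lines.length : Int), hj1', hj2', ?_⟩
      have hjl := List.mem_range.mp hjr'
      rw [pv_wrap lines _ (by omega) (by omega)]
      have : lines.length - (-((j' : Int) - (lines.length : Int))).toNat = j' := by omega
      rw [this]
      exact hjm'
    · -- start only on the last line, and an end line appears strictly later: A reports -1, B a real end index
      have hjl := List.mem_range.mp hjr
      have hlast : PySem.List.pyGetD lines (-1) "" = lines.getD (lines.length - 1) "" := by
        rw [pv_wrap lines (-1) (by omega) (by omega)]
        norm_num
      have hm1 : PySem.Str.isIn "Planning start frame sequence id" (PySem.List.pyGetD lines (-1) "") = true := by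
        rw [hlast]; exact hml
      have hexm : ∃ x ∈ PySem.List.pyRange n (lines.length : Int) 1,
          PySem.Str.isIn "Planning start frame sequence id" (PySem.List.pyGetD lines x "") = true :=
        ⟨-1, (PySem.List.mem_pyRange_one).mpr ⟨by omega, by omega⟩, hm1⟩
      obtain ⟨i0, hi0mem, hi0m, hmin, heq⟩ :=
        pv_searchStartA_spec lines _ (PySem.List.pairwise_lt_pyRange_one _ _) hexm
      have hbounds := (PySem.List.mem_pyRange_one).mp hi0mem
      have hi0neg : i0 < 0 :=
        lt_of_le_of_lt (hmin (-1) ((PySem.List.mem_pyRange_one).mpr ⟨by omega, by omega⟩) hm1) (by omega)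
      have hi0 : i0 = -1 := pv_i0_eq_neg_one lines n i0 hi0m hbounds.1 hi0neg hc1
      subst hi0
      -- B's end search starts at -1, skips the last line (no end marker there) and lands on a j ≥ 0
      have hemem : searchEndA lines (gsb (PySem.List.pyGetD lines (-1) "") "sequence id = [" "]")
          (PySem.List.pyRange (-1) (lines.length : Int) 1) ∈ PySem.List.pyRange 0 (lines.length : Int) 1 := by
        rw [PySem.List.pyRange_one_cons (by omega : (-1:Int) < (lines.length : Int))]
        simp only [searchEndA]
        rw [if_neg (by rw [hlast]; exact hnel)]
        apply pv_searchEndA_mem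
        refine ⟨(j : Int), (PySem.List.mem_pyRange_one).mpr ⟨by omega, by omega⟩, ?_⟩
        rw [pv_wrap_nonneg lines (j : Int) (by omega) (by omega), hlast]
        simp only [Int.toNat_natCast]
        exact hje
      have he0 : 0 ≤ searchEndA lines (gsb (PySem.List.pyGetD lines (-1) "") "sequence id = [" "]")
          (PySem.List.pyRange (-1) (lines.length : Int) 1) := ((PySem.List.mem_pyRange_one).mp hemem).1
      have hA : search_next lines n =
          (-1, -1, gsb (PySem.List.pyGetD lines (-1) "") "sequence id = [" "]", get_time (PySem.List.pyGetD lines (-1) "")) := by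
        unfold search_next
        rw [heq]
        simp only []
        rw [if_pos (by omega : (-1:Int) < 0)]
      have hB : (search_next_alt lines n).2.1 = searchEndA lines (gsb (PySem.List.pyGetD lines (-1) "") "sequence id = [" "]")
          (PySem.List.pyRange (-1) (lines.length : Int) 1) := by
        unfold search_next_alt
        rw [pv_loopB_found lines ((lines.length : Int) - n).toNat n rfl hexm, heq]
      intro hcontra
      have : (search_next lines n).2.1 = searchEndA lines (gsb (PySem.List.pyGetD lines (-1) "") "sequence id = [" "]")
          (PySem.List.pyRange (-1) (lines.length : Int) 1) := by rw [hcontra, hB]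
      rw [hA] at this
      simp at this
      omega
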